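-- pv_equiv track=rewrite | github.com/SOPHEA36/Chat-04-Feb-2 | scripts/csv_engine.py | detect_feature_key
-- ===== SOURCE A (Python) =====
-- from typing import Any, Dict, List, Optional, Tuple
--
-- def _low(s: Any) -> str:
--     return (str(s) or "").strip().lower()
--
-- _FEATURE_MAP: List[Tuple[str, List[str]]] = [
--     # Transmission — must come before generic "engine" to win longest-match
--     ("spec_transmission", ["transmission type", "transmission", "gearbox", "gear box", "gear type"]),
--     ("spec_fuel_tank_capacity", ["fuel tank capacity", "fuel tank", "tank capacity"]),
--     ("spec_srs_airbags", ["srs airbag", "airbag", "airbags", "number of airbags"]),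
--     ("seats", ["seating capacity", "seat number", "how many seats", "number of seats", "seats", "seat"]),
--     ("spec_ground_clearance", ["ground clearance", "clearance"]),
--     # CarPlay / Android Auto — order: longer alias first wins
--     ("spec_apple_carplay_and_android_auto", [
--         "apple carplay and android auto", "apple carplay or android auto",
--         "apple carplay / android auto", "carplay and android auto",
--         "apple carplay", "android auto", "carplay",
--     ]),
--     ("spec_apple_carplay_or_android_auto", [
--         "apple carplay and android auto", "apple carplay or android auto",
--         "apple carplay / android auto", "carplay and android auto",
--         "apple carplay", "android auto", "carplay",
--     ]),
--     # 360 / panoramic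
--     ("spec_panoramic_view_monitor_pvm", [
--         "360° panoramic view monitor", "panoramic view monitor", "360 camera",
--         "360camera", "around view", "pvm", "360°", "360",
--     ]),
--     ("spec_blind_spot_monitor_bsm", ["blind spot monitor", "blind spot monitoring", "blind spot", "bsm"]),
--     ("spec_headup_display_hud", ["head-up display", "heads-up display", "head up display", "hud"]),
--     # Sunroof — FIX T029
--     ("spec_sunroof", ["panoramic sunroof", "sunroof", "moonroof", "panoramic roof", "glass roof"]),
--     ("spec_wireless_charger", ["wireless charging pad", "wireless charger", "wireless charg", "qi charging"]),
--     ("spec_wireless_charging", ["wireless charging pad", "wireless charger", "wireless charg", "qi charging"]),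
--     ("spec_reverse_camera", ["reverse camera", "reversing camera", "backup camera", "rear camera"]),
--     ("spec_parking_sensors", ["parking sensor", "parking assist"]),
--     ("spec_safety_rating", ["safety rating", "ncap rating", "ncap"]),
--     ("spec_lane_departure_warning_ldw", ["lane departure warning", "lane keep", "lane warning", "ldw"]),
--     ("spec_vehicle_stability_control_vsc", ["vehicle stability control", "stability control", "vsc"]),
--     ("spec_smart_entry", ["smart entry", "keyless entry", "smart key", "keyless"]),
--     ("spec_ignition", ["push start ignition", "push start button", "ignition", "push start"]),
--     ("spec_drive_type", ["drive type", "drivetrain", "4wd", "awd", "fwd", "2wd", "4x4"]),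
--     ("spec_displacement", ["engine displacement", "engine capacity", "displacement", "engine size", "engine cc"]),
--     ("spec_engine_type", ["engine type", "engine specification", "engine"]),
--     ("spec_wheelbase", ["wheelbase", "wheel base"]),
--     ("spec_length___width___height", ["length width height", "dimensions", "dimension", "l x w x h", "l×w×h"]),
--     ("spec_max_output", ["maximum output", "max output", "power output", "horsepower", "bhp", "hp"]),
--     ("spec_max_torque", ["maximum torque", "max torque", "torque"]),
--     ("fuel", ["fuel type", "type of fuel", "fuel"]),
--     # Cruise control — FIX T024 / Fortuner cruise control
--     ("spec_cruise_control", ["adaptive cruise control", "dynamic radar cruise", "cruise control", "drcc", "cruise"]),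
-- ]
--
-- def detect_feature_key(text: str) -> Optional[str]:
--     t = _low(text)
--     best_col: Optional[str] = None
--     best_len = 0
--     for col, keywords in _FEATURE_MAP:
--         for kw in keywords:
--             if kw in t and len(kw) > best_len:
--                 best_col = col
--                 best_len = len(kw)
--     return best_col
-- ===== SOURCE B (Python) =====
-- from typing import List, Optional, Tuple
--
-- # One flat keyword -> column table, in the same priority order as the original
-- # nested map (row order, then keyword order within a row).
-- _KEYWORD_TABLE: List[Tuple[str, str]] = [
--     ('transmission type', 'spec_transmission'),
--     ('transmission', 'spec_transmission'),
--     ('gearbox', 'spec_transmission'),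
--     ('gear box', 'spec_transmission'),
--     ('gear type', 'spec_transmission'),
--     ('fuel tank capacity', 'spec_fuel_tank_capacity'),
--     ('fuel tank', 'spec_fuel_tank_capacity'),
--     ('tank capacity', 'spec_fuel_tank_capacity'),
--     ('srs airbag', 'spec_srs_airbags'),
--     ('airbag', 'spec_srs_airbags'),
--     ('airbags', 'spec_srs_airbags'),
--     ('number of airbags', 'spec_srs_airbags'),
--     ('seating capacity', 'seats'),
--     ('seat number', 'seats'),
--     ('how many seats', 'seats'),
--     ('number of seats', 'seats'),
--     ('seats', 'seats'),
--     ('seat', 'seats'),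
--     ('ground clearance', 'spec_ground_clearance'),
--     ('clearance', 'spec_ground_clearance'),
--     ('apple carplay and android auto', 'spec_apple_carplay_and_android_auto'),
--     ('apple carplay or android auto', 'spec_apple_carplay_and_android_auto'),
--     ('apple carplay / android auto', 'spec_apple_carplay_and_android_auto'),
--     ('carplay and android auto', 'spec_apple_carplay_and_android_auto'),
--     ('apple carplay', 'spec_apple_carplay_and_android_auto'),
--     ('android auto', 'spec_apple_carplay_and_android_auto'),
--     ('carplay', 'spec_apple_carplay_and_android_auto'),
--     ('apple carplay and android auto', 'spec_apple_carplay_or_android_auto'),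
--     ('apple carplay or android auto', 'spec_apple_carplay_or_android_auto'),
--     ('apple carplay / android auto', 'spec_apple_carplay_or_android_auto'),
--     ('carplay and android auto', 'spec_apple_carplay_or_android_auto'),
--     ('apple carplay', 'spec_apple_carplay_or_android_auto'),
--     ('android auto', 'spec_apple_carplay_or_android_auto'),
--     ('carplay', 'spec_apple_carplay_or_android_auto'),
--     ('360° panoramic view monitor', 'spec_panoramic_view_monitor_pvm'),
--     ('panoramic view monitor', 'spec_panoramic_view_monitor_pvm'),
--     ('360 camera', 'spec_panoramic_view_monitor_pvm'),
--     ('360camera', 'spec_panoramic_view_monitor_pvm'),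
--     ('around view', 'spec_panoramic_view_monitor_pvm'),
--     ('pvm', 'spec_panoramic_view_monitor_pvm'),
--     ('360°', 'spec_panoramic_view_monitor_pvm'),
--     ('360', 'spec_panoramic_view_monitor_pvm'),
--     ('blind spot monitor', 'spec_blind_spot_monitor_bsm'),
--     ('blind spot monitoring', 'spec_blind_spot_monitor_bsm'),
--     ('blind spot', 'spec_blind_spot_monitor_bsm'),
--     ('bsm', 'spec_blind_spot_monitor_bsm'),
--     ('head-up display', 'spec_headup_display_hud'),
--     ('heads-up display', 'spec_headup_display_hud'),
--     ('head up display', 'spec_headup_display_hud'),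
--     ('hud', 'spec_headup_display_hud'),
--     ('panoramic sunroof', 'spec_sunroof'),
--     ('sunroof', 'spec_sunroof'),
--     ('moonroof', 'spec_sunroof'),
--     ('panoramic roof', 'spec_sunroof'),
--     ('glass roof', 'spec_sunroof'),
--     ('wireless charging pad', 'spec_wireless_charger'),
--     ('wireless charger', 'spec_wireless_charger'),
--     ('wireless charg', 'spec_wireless_charger'),
--     ('qi charging', 'spec_wireless_charger'),
--     ('wireless charging pad', 'spec_wireless_charging'),
--     ('wireless charger', 'spec_wireless_charging'),
--     ('wireless charg', 'spec_wireless_charging'),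
--     ('qi charging', 'spec_wireless_charging'),
--     ('reverse camera', 'spec_reverse_camera'),
--     ('reversing camera', 'spec_reverse_camera'),
--     ('backup camera', 'spec_reverse_camera'),
--     ('rear camera', 'spec_reverse_camera'),
--     ('parking sensor', 'spec_parking_sensors'),
--     ('parking assist', 'spec_parking_sensors'),
--     ('safety rating', 'spec_safety_rating'),
--     ('ncap rating', 'spec_safety_rating'),
--     ('ncap', 'spec_safety_rating'),
--     ('lane departure warning', 'spec_lane_departure_warning_ldw'),
--     ('lane keep', 'spec_lane_departure_warning_ldw'),
--     ('lane warning', 'spec_lane_departure_warning_ldw'),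
--     ('ldw', 'spec_lane_departure_warning_ldw'),
--     ('vehicle stability control', 'spec_vehicle_stability_control_vsc'),
--     ('stability control', 'spec_vehicle_stability_control_vsc'),
--     ('vsc', 'spec_vehicle_stability_control_vsc'),
--     ('smart entry', 'spec_smart_entry'),
--     ('keyless entry', 'spec_smart_entry'),
--     ('smart key', 'spec_smart_entry'),
--     ('keyless', 'spec_smart_entry'),
--     ('push start ignition', 'spec_ignition'),
--     ('push start button', 'spec_ignition'),
--     ('ignition', 'spec_ignition'),
--     ('push start', 'spec_ignition'),
--     ('drive type', 'spec_drive_type'),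
--     ('drivetrain', 'spec_drive_type'),
--     ('4wd', 'spec_drive_type'),
--     ('awd', 'spec_drive_type'),
--     ('fwd', 'spec_drive_type'),
--     ('2wd', 'spec_drive_type'),
--     ('4x4', 'spec_drive_type'),
--     ('engine displacement', 'spec_displacement'),
--     ('engine capacity', 'spec_displacement'),
--     ('displacement', 'spec_displacement'),
--     ('engine size', 'spec_displacement'),
--     ('engine cc', 'spec_displacement'),
--     ('engine type', 'spec_engine_type'),
--     ('engine specification', 'spec_engine_type'),
--     ('engine', 'spec_engine_type'),
--     ('wheelbase', 'spec_wheelbase'),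
--     ('wheel base', 'spec_wheelbase'),
--     ('length width height', 'spec_length___width___height'),
--     ('dimensions', 'spec_length___width___height'),
--     ('dimension', 'spec_length___width___height'),
--     ('l x w x h', 'spec_length___width___height'),
--     ('l×w×h', 'spec_length___width___height'),
--     ('maximum output', 'spec_max_output'),
--     ('max output', 'spec_max_output'),
--     ('power output', 'spec_max_output'),
--     ('horsepower', 'spec_max_output'),
--     ('bhp', 'spec_max_output'),
--     ('hp', 'spec_max_output'),
--     ('maximum torque', 'spec_max_torque'),
--     ('max torque', 'spec_max_torque'),
--     ('torque', 'spec_max_torque'),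
--     ('fuel type', 'fuel'),
--     ('type of fuel', 'fuel'),
--     ('fuel', 'fuel'),
--     ('adaptive cruise control', 'spec_cruise_control'),
--     ('dynamic radar cruise', 'spec_cruise_control'),
--     ('cruise control', 'spec_cruise_control'),
--     ('drcc', 'spec_cruise_control'),
--     ('cruise', 'spec_cruise_control'),
-- ];
--
-- # Stable sort by keyword length descending: among equal lengths the original
-- # priority order is kept, so the first containment hit is the longest match
-- # (earliest keyword on ties), exactly A's winner.
-- _BY_LENGTH: List[Tuple[str, str]] = sorted(
--     _KEYWORD_TABLE, key=lambda p: len(p[0]), reverse=True)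
--
-- def detect_feature_key(text: str) -> Optional[str]:
--     t = text.strip().lower()
--     for kw, col in _BY_LENGTH:
--         if kw in t:
--             return col
--     return None
-- ===== Notes on version B (the rewrite author's own statement) =====
-- stated objective: alternative
-- what changed: B replaces the nested map and per-call running-longest-match scan by one flat keyword->column table stably sorted once at import by keyword length descending, returning the column of the first keyword contained in the text.
import Mathlib
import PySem

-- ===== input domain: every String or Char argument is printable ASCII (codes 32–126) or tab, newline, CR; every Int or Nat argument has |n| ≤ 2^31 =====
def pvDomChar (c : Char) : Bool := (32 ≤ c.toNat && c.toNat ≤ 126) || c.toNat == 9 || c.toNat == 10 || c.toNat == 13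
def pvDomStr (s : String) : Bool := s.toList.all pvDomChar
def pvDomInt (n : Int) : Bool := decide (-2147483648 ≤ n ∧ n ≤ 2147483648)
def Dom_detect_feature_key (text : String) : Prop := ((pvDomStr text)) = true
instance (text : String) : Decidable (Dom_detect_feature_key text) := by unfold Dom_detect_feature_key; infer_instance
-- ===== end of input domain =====

-- B keeps one flat keyword→column table sorted stably by length descending and returns the
-- column of the first keyword contained in the normalized text, instead of A's running
-- longest-match scan over the nested map (alternative decomposition; same per-call cost).

-- ===== PORT A =====
-- _low(s) for a str argument: (str(s) or "").strip().lower()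
def pvLow (s : String) : String :=
  PySem.Str.lower (PySem.Str.strip (if s == "" then "" else s))

-- _FEATURE_MAP
def pvFeatureMap : List (String × List String) := [
  ("spec_transmission", ["transmission type", "transmission", "gearbox", "gear box", "gear type"]),
  ("spec_fuel_tank_capacity", ["fuel tank capacity", "fuel tank", "tank capacity"]),
  ("spec_srs_airbags", ["srs airbag", "airbag", "airbags", "number of airbags"]),
  ("seats", ["seating capacity", "seat number", "how many seats", "number of seats", "seats", "seat"]),
  ("spec_ground_clearance", ["ground clearance", "clearance"]),
  ("spec_apple_carplay_and_android_auto", ["apple carplay and android auto", "apple carplay or android auto", "apple carplay / android auto", "carplay and android auto", "apple carplay", "android auto", "carplay"]),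
  ("spec_apple_carplay_or_android_auto", ["apple carplay and android auto", "apple carplay or android auto", "apple carplay / android auto", "carplay and android auto", "apple carplay", "android auto", "carplay"]),
  ("spec_panoramic_view_monitor_pvm", ["360° panoramic view monitor", "panoramic view monitor", "360 camera", "360camera", "around view", "pvm", "360°", "360"]),
  ("spec_blind_spot_monitor_bsm", ["blind spot monitor", "blind spot monitoring", "blind spot", "bsm"]),
  ("spec_headup_display_hud", ["head-up display", "heads-up display", "head up display", "hud"]),
  ("spec_sunroof", ["panoramic sunroof", "sunroof", "moonroof", "panoramic roof", "glass roof"]),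
  ("spec_wireless_charger", ["wireless charging pad", "wireless charger", "wireless charg", "qi charging"]),
  ("spec_wireless_charging", ["wireless charging pad", "wireless charger", "wireless charg", "qi charging"]),
  ("spec_reverse_camera", ["reverse camera", "reversing camera", "backup camera", "rear camera"]),
  ("spec_parking_sensors", ["parking sensor", "parking assist"]),
  ("spec_safety_rating", ["safety rating", "ncap rating", "ncap"]),
  ("spec_lane_departure_warning_ldw", ["lane departure warning", "lane keep", "lane warning", "ldw"]),
  ("spec_vehicle_stability_control_vsc", ["vehicle stability control", "stability control", "vsc"]),
  ("spec_smart_entry", ["smart entry", "keyless entry", "smart key", "keyless"]),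
  ("spec_ignition", ["push start ignition", "push start button", "ignition", "push start"]),
  ("spec_drive_type", ["drive type", "drivetrain", "4wd", "awd", "fwd", "2wd", "4x4"]),
  ("spec_displacement", ["engine displacement", "engine capacity", "displacement", "engine size", "engine cc"]),
  ("spec_engine_type", ["engine type", "engine specification", "engine"]),
  ("spec_wheelbase", ["wheelbase", "wheel base"]),
  ("spec_length___width___height", ["length width height", "dimensions", "dimension", "l x w x h", "l×w×h"]),
  ("spec_max_output", ["maximum output", "max output", "power output", "horsepower", "bhp", "hp"]),
  ("spec_max_torque", ["maximum torque", "max torque", "torque"]),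
  ("fuel", ["fuel type", "type of fuel", "fuel"]),
  ("spec_cruise_control", ["adaptive cruise control", "dynamic radar cruise", "cruise control", "drcc", "cruise"])
]

def detect_feature_key (text : String) : Option String :=
  let t := pvLow text
  (pvFeatureMap.foldl
    (fun (st : Option String × Int) p =>
      p.2.foldl
        (fun st kw =>
          if PySem.Str.isIn kw t = true ∧ st.2 < PySem.Str.len kw then (some p.1, PySem.Str.len kw) else st)
        st)
    (none, 0)).1

-- ===== PORT B =====
-- _KEYWORD_TABLE: the flat (keyword, column) table, in priority order
def pvKeywordTable : List (String × String) := [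
  ("transmission type", "spec_transmission"),
  ("transmission", "spec_transmission"),
  ("gearbox", "spec_transmission"),
  ("gear box", "spec_transmission"),
  ("gear type", "spec_transmission"),
  ("fuel tank capacity", "spec_fuel_tank_capacity"),
  ("fuel tank", "spec_fuel_tank_capacity"),
  ("tank capacity", "spec_fuel_tank_capacity"),
  ("srs airbag", "spec_srs_airbags"),
  ("airbag", "spec_srs_airbags"),
  ("airbags", "spec_srs_airbags"),
  ("number of airbags", "spec_srs_airbags"),
  ("seating capacity", "seats"),
  ("seat number", "seats"),
  ("how many seats", "seats"),
  ("number of seats", "seats"),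
  ("seats", "seats"),
  ("seat", "seats"),
  ("ground clearance", "spec_ground_clearance"),
  ("clearance", "spec_ground_clearance"),
  ("apple carplay and android auto", "spec_apple_carplay_and_android_auto"),
  ("apple carplay or android auto", "spec_apple_carplay_and_android_auto"),
  ("apple carplay / android auto", "spec_apple_carplay_and_android_auto"),
  ("carplay and android auto", "spec_apple_carplay_and_android_auto"),
  ("apple carplay", "spec_apple_carplay_and_android_auto"),
  ("android auto", "spec_apple_carplay_and_android_auto"),
  ("carplay", "spec_apple_carplay_and_android_auto"),
  ("apple carplay and android auto", "spec_apple_carplay_or_android_auto"),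
  ("apple carplay or android auto", "spec_apple_carplay_or_android_auto"),
  ("apple carplay / android auto", "spec_apple_carplay_or_android_auto"),
  ("carplay and android auto", "spec_apple_carplay_or_android_auto"),
  ("apple carplay", "spec_apple_carplay_or_android_auto"),
  ("android auto", "spec_apple_carplay_or_android_auto"),
  ("carplay", "spec_apple_carplay_or_android_auto"),
  ("360° panoramic view monitor", "spec_panoramic_view_monitor_pvm"),
  ("panoramic view monitor", "spec_panoramic_view_monitor_pvm"),
  ("360 camera", "spec_panoramic_view_monitor_pvm"),
  ("360camera", "spec_panoramic_view_monitor_pvm"),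
  ("around view", "spec_panoramic_view_monitor_pvm"),
  ("pvm", "spec_panoramic_view_monitor_pvm"),
  ("360°", "spec_panoramic_view_monitor_pvm"),
  ("360", "spec_panoramic_view_monitor_pvm"),
  ("blind spot monitor", "spec_blind_spot_monitor_bsm"),
  ("blind spot monitoring", "spec_blind_spot_monitor_bsm"),
  ("blind spot", "spec_blind_spot_monitor_bsm"),
  ("bsm", "spec_blind_spot_monitor_bsm"),
  ("head-up display", "spec_headup_display_hud"),
  ("heads-up display", "spec_headup_display_hud"),
  ("head up display", "spec_headup_display_hud"),
  ("hud", "spec_headup_display_hud"),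
  ("panoramic sunroof", "spec_sunroof"),
  ("sunroof", "spec_sunroof"),
  ("moonroof", "spec_sunroof"),
  ("panoramic roof", "spec_sunroof"),
  ("glass roof", "spec_sunroof"),
  ("wireless charging pad", "spec_wireless_charger"),
  ("wireless charger", "spec_wireless_charger"),
  ("wireless charg", "spec_wireless_charger"),
  ("qi charging", "spec_wireless_charger"),
  ("wireless charging pad", "spec_wireless_charging"),
  ("wireless charger", "spec_wireless_charging"),
  ("wireless charg", "spec_wireless_charging"),
  ("qi charging", "spec_wireless_charging"),
  ("reverse camera", "spec_reverse_camera"),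
  ("reversing camera", "spec_reverse_camera"),
  ("backup camera", "spec_reverse_camera"),
  ("rear camera", "spec_reverse_camera"),
  ("parking sensor", "spec_parking_sensors"),
  ("parking assist", "spec_parking_sensors"),
  ("safety rating", "spec_safety_rating"),
  ("ncap rating", "spec_safety_rating"),
  ("ncap", "spec_safety_rating"),
  ("lane departure warning", "spec_lane_departure_warning_ldw"),
  ("lane keep", "spec_lane_departure_warning_ldw"),
  ("lane warning", "spec_lane_departure_warning_ldw"),
  ("ldw", "spec_lane_departure_warning_ldw"),
  ("vehicle stability control", "spec_vehicle_stability_control_vsc"),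
  ("stability control", "spec_vehicle_stability_control_vsc"),
  ("vsc", "spec_vehicle_stability_control_vsc"),
  ("smart entry", "spec_smart_entry"),
  ("keyless entry", "spec_smart_entry"),
  ("smart key", "spec_smart_entry"),
  ("keyless", "spec_smart_entry"),
  ("push start ignition", "spec_ignition"),
  ("push start button", "spec_ignition"),
  ("ignition", "spec_ignition"),
  ("push start", "spec_ignition"),
  ("drive type", "spec_drive_type"),
  ("drivetrain", "spec_drive_type"),
  ("4wd", "spec_drive_type"),
  ("awd", "spec_drive_type"),
  ("fwd", "spec_drive_type"),
  ("2wd", "spec_drive_type"),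
  ("4x4", "spec_drive_type"),
  ("engine displacement", "spec_displacement"),
  ("engine capacity", "spec_displacement"),
  ("displacement", "spec_displacement"),
  ("engine size", "spec_displacement"),
  ("engine cc", "spec_displacement"),
  ("engine type", "spec_engine_type"),
  ("engine specification", "spec_engine_type"),
  ("engine", "spec_engine_type"),
  ("wheelbase", "spec_wheelbase"),
  ("wheel base", "spec_wheelbase"),
  ("length width height", "spec_length___width___height"),
  ("dimensions", "spec_length___width___height"),
  ("dimension", "spec_length___width___height"),
  ("l x w x h", "spec_length___width___height"),
  ("l×w×h", "spec_length___width___height"),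
  ("maximum output", "spec_max_output"),
  ("max output", "spec_max_output"),
  ("power output", "spec_max_output"),
  ("horsepower", "spec_max_output"),
  ("bhp", "spec_max_output"),
  ("hp", "spec_max_output"),
  ("maximum torque", "spec_max_torque"),
  ("max torque", "spec_max_torque"),
  ("torque", "spec_max_torque"),
  ("fuel type", "fuel"),
  ("type of fuel", "fuel"),
  ("fuel", "fuel"),
  ("adaptive cruise control", "spec_cruise_control"),
  ("dynamic radar cruise", "spec_cruise_control"),
  ("cruise control", "spec_cruise_control"),
  ("drcc", "spec_cruise_control"),
  ("cruise", "spec_cruise_control")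
]

-- _BY_LENGTH = sorted(_KEYWORD_TABLE, key=lambda p: len(p[0]), reverse=True)
def pvByLength : List (String × String) :=
  PySem.List.sorted pvKeywordTable (fun p => PySem.Str.len p.1) true

-- the for-loop with early return
def pvFirstMatch : List (String × String) → String → Option String
  | [], _ => none
  | q :: rest, t => if PySem.Str.isIn q.1 t then some q.2 else pvFirstMatch rest t

def detect_feature_key_alt (text : String) : Option String :=
  pvFirstMatch pvByLength (PySem.Str.lower (PySem.Str.strip text))

-- ===== PRECONDITION & SPEC =====
def Spec_detect_feature_key (text : String) (out : Option String) : Prop := out = detect_feature_key_alt text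
instance (text : String) (out : Option String) : Decidable (Spec_detect_feature_key text out) := by unfold Spec_detect_feature_key; infer_instance

-- ===== CLAIM =====
def Claim_equal_detect_feature_key : Prop := ∀ (text : String), Dom_detect_feature_key text → Spec_detect_feature_key text (detect_feature_key text)

-- ===== LEMMAS AND PROOFS =====

-- A's loop step, on a flattened (keyword, col) pair; f is the containment test for the fixed text
def pvStep (f : String → Bool) (st : Option String × Int) (q : String × String) : Option String × Int :=
  if f q.1 = true ∧ st.2 < PySem.Str.len q.1 then (some q.2, PySem.Str.len q.1) else st

-- A's fold state as a function of B's first-match result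
def pvToSt : Option (String × String) → Option String × Int
  | none => (none, 0)
  | some q => (some q.2, PySem.Str.len q.1)

def pvBefore (a b : String × String) : Bool := decide (PySem.Str.len b.1 < PySem.Str.len a.1)

def pvLe (a b : String × String) : Prop := PySem.Str.len b.1 ≤ PySem.Str.len a.1

theorem pv_firstMatch_find? (l : List (String × String)) (t : String) :
    pvFirstMatch l t = (l.find? (fun q => PySem.Str.isIn q.1 t)).map (fun q => q.2) := by
  induction l with
  | nil => rfl
  | cons q rest ih =>
    rw [show pvFirstMatch (q :: rest) t
        = (if PySem.Str.isIn q.1 t then some q.2 else pvFirstMatch rest t) from rfl]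
    by_cases hq : PySem.Str.isIn q.1 t = true
    · rw [List.find?_cons_of_pos (by simpa using hq), if_pos hq]
      rfl
    · rw [List.find?_cons_of_neg (by simpa using hq), if_neg hq]
      exact ih

theorem pv_low_eq (s : String) : pvLow s = PySem.Str.lower (PySem.Str.strip s) := by
  by_cases h : s = ""
  · subst h; rfl
  · simp [pvLow, h]

theorem pv_foldl_flat (f : String → Bool) (l : List (String × List String)) (init : Option String × Int) :
    l.foldl
      (fun st p => p.2.foldl
        (fun st kw =>
          if f kw = true ∧ st.2 < PySem.Str.len kw then (some p.1, PySem.Str.len kw) else st) st)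
      init
    = (l.flatMap (fun p => p.2.map (fun kw => (kw, p.1)))).foldl (pvStep f) init := by
  induction l generalizing init with
  | nil => rfl
  | cons p l ih =>
    simp only [List.foldl_cons, List.flatMap_cons, List.foldl_append, List.foldl_map, ih]
    rfl

theorem pv_pairwise_insertBy (x : String × String) (acc : List (String × String))
    (h : acc.Pairwise pvLe) : (PySem.List.insertBy pvBefore x acc).Pairwise pvLe := by
  induction acc with
  | nil => simp [PySem.List.insertBy, pvLe]
  | cons y ys ih =>
    rcases List.pairwise_cons.mp h with ⟨hy, hys⟩
    by_cases hb : pvBefore x y = true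
    · have hxy : PySem.Str.len y.1 < PySem.Str.len x.1 := by simpa [pvBefore] using hb
      rw [show PySem.List.insertBy pvBefore x (y :: ys) = x :: y :: ys by
        simp [PySem.List.insertBy, hb]]
      refine List.pairwise_cons.mpr ⟨?_, h⟩
      intro z hz
      rcases List.mem_cons.mp hz with hz | hz
      · subst hz; exact le_of_lt hxy
      · exact le_trans (hy z hz) (le_of_lt hxy)
    · have hxy : ¬ PySem.Str.len y.1 < PySem.Str.len x.1 := by simpa [pvBefore] using hb
      rw [show PySem.List.insertBy pvBefore x (y :: ys) = y :: PySem.List.insertBy pvBefore x ys by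
        simp [PySem.List.insertBy, hb]]
      refine List.pairwise_cons.mpr ⟨?_, ih hys⟩
      intro z hz
      rcases (PySem.List.mem_insertBy pvBefore x z ys).mp hz with hz | hz
      · subst hz; exact le_of_not_gt hxy
      · exact hy z hz

theorem pv_step_insert (f : String → Bool) (x : String × String) (acc : List (String × String))
    (h : acc.Pairwise pvLe) (hx : 0 < PySem.Str.len x.1) :
    pvStep f (pvToSt (acc.find? (fun q => f q.1))) x
      = pvToSt ((PySem.List.insertBy pvBefore x acc).find? (fun q => f q.1)) := by
  have hx' : ¬ x.1 = "" := by
    intro he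
    rw [he] at hx
    simp [PySem.Str.len] at hx
  induction acc with
  | nil =>
    rw [show PySem.List.insertBy pvBefore x [] = [x] by simp [PySem.List.insertBy]]
    by_cases hf : f x.1 = true
    · conv_rhs => rw [List.find?_cons_of_pos (by simpa using hf)]
      simp [pvStep, pvToSt, hf, hx']
    · conv_rhs => rw [List.find?_cons_of_neg (by simpa using hf)]
      simp [pvStep, pvToSt, hf]
  | cons y ys ih =>
    rcases List.pairwise_cons.mp h with ⟨hy, hys⟩
    by_cases hb : pvBefore x y = true
    · have hxy : PySem.Str.len y.1 < PySem.Str.len x.1 := by simpa [pvBefore] using hb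
      rw [show PySem.List.insertBy pvBefore x (y :: ys) = x :: y :: ys by
        simp [PySem.List.insertBy, hb]]
      by_cases hf : f x.1 = true
      · conv_rhs => rw [List.find?_cons_of_pos (by simpa using hf)]
        rcases hm : (y :: ys).find? (fun q => f q.1) with _ | q
        · rw [hm]; simp [pvStep, pvToSt, hf, hx']
        · rw [hm]
          have hqmem : q ∈ y :: ys := List.mem_of_find?_eq_some hm
          have hql : PySem.Str.len q.1 < PySem.Str.len x.1 := by
            rcases List.mem_cons.mp hqmem with hq | hq
            · subst hq; exact hxy
            · exact lt_of_le_of_lt (hy q hq) hxy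
          have hql' : q.1.length < x.1.length := by simpa [PySem.Str.len] using hql
          simp [pvStep, pvToSt, hf]
          omega
      · conv_rhs => rw [List.find?_cons_of_neg (by simpa using hf)]
        rcases hm : (y :: ys).find? (fun q => f q.1) with _ | q <;>
          rw [hm] <;> simp [pvStep, pvToSt, hf]
    · have hxy : ¬ PySem.Str.len y.1 < PySem.Str.len x.1 := by simpa [pvBefore] using hb
      rw [show PySem.List.insertBy pvBefore x (y :: ys) = y :: PySem.List.insertBy pvBefore x ys by
        simp [PySem.List.insertBy, hb]]
      by_cases hfy : f y.1 = true
      · conv_lhs => rw [List.find?_cons_of_pos (by simpa using hfy)]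
        conv_rhs => rw [List.find?_cons_of_pos (by simpa using hfy)]
        have hxy' : ¬ y.1.length < x.1.length := by simpa [PySem.Str.len] using hxy
        simp [pvStep, pvToSt]
        intro _ h2
        exact absurd h2 hxy'
      · conv_lhs => rw [List.find?_cons_of_neg (by simpa using hfy)]
        conv_rhs => rw [List.find?_cons_of_neg (by simpa using hfy)]
        exact ih hys

theorem pv_main (f : String → Bool) (l acc : List (String × String))
    (hl : ∀ p ∈ l, 0 < PySem.Str.len p.1) (h : acc.Pairwise pvLe) :
    l.foldl (pvStep f) (pvToSt (acc.find? (fun q => f q.1)))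
      = pvToSt ((l.foldl (fun a x => PySem.List.insertBy pvBefore x a) acc).find? (fun q => f q.1)) := by
  induction l generalizing acc with
  | nil => rfl
  | cons x l ih =>
    have hx : 0 < PySem.Str.len x.1 := hl x (List.mem_cons_self ..)
    have hl' : ∀ p ∈ l, 0 < PySem.Str.len p.1 := fun p hp => hl p (List.mem_cons_of_mem _ hp)
    simp only [List.foldl_cons]
    rw [pv_step_insert f x acc h hx]
    exact ih _ hl' (pv_pairwise_insertBy x acc h)

-- the flattening comprehension of A's nested map is exactly B's flat table
theorem pv_flat_eq_table :
    pvFeatureMap.flatMap (fun p => p.2.map (fun kw => (kw, p.1))) = pvKeywordTable := rfl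

set_option maxRecDepth 8192 in
theorem pv_table_nonempty : ∀ p ∈ pvKeywordTable, 0 < PySem.Str.len p.1 := by decide

theorem pv_toSt_fst (m : Option (String × String)) : (pvToSt m).1 = m.map (fun p => p.2) := by
  cases m <;> rfl

-- ===== VERDICT =====
theorem detect_feature_key_spec : Claim_equal_detect_feature_key := by
  intro text _
  unfold Spec_detect_feature_key
  simp only [detect_feature_key, detect_feature_key_alt]
  rw [pv_firstMatch_find?, ← pv_low_eq]
  rw [show ((none : Option String), (0 : Int))
        = pvToSt (List.find? (fun q => (fun kw => PySem.Str.isIn kw (pvLow text)) q.1) []) from rfl]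
  rw [pv_foldl_flat (fun kw => PySem.Str.isIn kw (pvLow text)) pvFeatureMap]
  rw [pv_flat_eq_table]
  rw [pv_main (fun kw => PySem.Str.isIn kw (pvLow text)) pvKeywordTable [] pv_table_nonempty
    List.Pairwise.nil]
  rw [pv_toSt_fst]
  show _ = ((PySem.List.sorted pvKeywordTable (fun p => PySem.Str.len p.1) true).find?
      (fun p => PySem.Str.isIn p.1 (pvLow text))).map (fun p => p.2)
  rw [PySem.List.sorted_rev_eq_foldl_insertBy]
  rfl
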